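-- pv_equiv track=rewrite | github.com/K3v1n0153/CODING_BAT_SOLUTIONS | Logic-2/no_teen_sum.py | no_teen_sum
-- ===== SOURCE A (Python) =====
-- def no_teen_sum(a, b, c):
--
-- 	count = 0
-- 	teen = [13, 14, 17, 18, 19]
--
-- 	for num in [a, b, c]:
-- 		if num not in teen:
-- 			count += num
-- 	count += 0
--
-- 	return count
-- ===== SOURCE B (Python) =====
-- def no_teen_sum(a, b, c):
--     # Subtract the teen values from the full sum, instead of conditionally
--     # accumulating non-teens. Teens are 13..19 with 15 and 16 exempted.
--     teens = [n for n in (a, b, c) if 13 <= n <= 19 and n != 15 and n != 16]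
--     return (a + b + c) - sum(teens)
-- ===== Notes on version B (the rewrite author's own statement) =====
-- stated objective: alternative
-- what changed: Instead of A's conditional accumulation over a list against an explicit teen set, B computes the full sum a+b+c and subtracts the values selected by a range test (13..19 excluding 15 and 16) in a separate filtering pass.
import Mathlib
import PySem

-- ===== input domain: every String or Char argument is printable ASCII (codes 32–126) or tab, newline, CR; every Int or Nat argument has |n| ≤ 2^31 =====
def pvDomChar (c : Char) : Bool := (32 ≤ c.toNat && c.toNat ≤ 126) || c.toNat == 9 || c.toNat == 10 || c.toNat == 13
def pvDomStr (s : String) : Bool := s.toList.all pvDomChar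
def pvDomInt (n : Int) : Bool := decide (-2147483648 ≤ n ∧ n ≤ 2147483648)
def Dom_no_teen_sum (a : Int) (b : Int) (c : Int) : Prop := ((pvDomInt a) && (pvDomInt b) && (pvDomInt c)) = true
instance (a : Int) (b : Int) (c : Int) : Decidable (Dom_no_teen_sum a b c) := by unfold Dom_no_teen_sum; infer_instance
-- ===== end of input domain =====

-- B replaces A's conditional accumulation against a teen list by computing the full
-- sum and subtracting the range-selected teens in a separate filtering pass; objective: alternative.

-- ===== PORT A =====
def no_teen_sum (a : Int) (b : Int) (c : Int) : Int :=
  let teen : List Int := [13, 14, 17, 18, 19]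
  let count : Int := [a, b, c].foldl (fun count num => if num ∉ teen then count + num else count) 0
  count + 0

-- ===== PORT B =====
def no_teen_sum_alt (a : Int) (b : Int) (c : Int) : Int :=
  let teens : List Int := [a, b, c].filter (fun n => 13 ≤ n && n ≤ 19 && n ≠ 15 && n ≠ 16)
  (a + b + c) - teens.sum

-- ===== PRECONDITION & SPEC =====
def Spec_no_teen_sum (a : Int) (b : Int) (c : Int) (out : Int) : Prop := out = no_teen_sum_alt a b c
instance (a : Int) (b : Int) (c : Int) (out : Int) : Decidable (Spec_no_teen_sum a b c out) := by unfold Spec_no_teen_sum; infer_instance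

-- ===== CLAIM (what is proved, stated in full; the proofs are below) =====
def Claim_equal_no_teen_sum : Prop := ∀ (a : Int) (b : Int) (c : Int), Dom_no_teen_sum a b c → Spec_no_teen_sum a b c (no_teen_sum a b c)

-- ===== LEMMAS AND PROOFS =====

-- ===== VERDICT (by name: the statement is the Claim_ definition above) =====
set_option maxHeartbeats 2000000 in
theorem no_teen_sum_spec : Claim_equal_no_teen_sum := by
  intro a b c _
  unfold Spec_no_teen_sum no_teen_sum no_teen_sum_alt
  simp only [List.foldl, List.filter_cons, List.filter_nil, List.mem_cons,
    List.not_mem_nil, or_false]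
  split_ifs <;>
    simp_all only [Bool.and_eq_true, decide_eq_true_eq, not_and, not_or,
      List.sum_cons, List.sum_nil, Bool.not_eq_false] <;>
    omega
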